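-- pv_equiv track=rewrite | github.com/shakirali/vocabularyWizardAPI | scripts/generate_vocabulary_content.py | group_words_by_level
-- ===== SOURCE A (Python) =====
-- from typing import Dict, List, Tuple
--
-- def group_words_by_level(words: List[Dict]) -> Dict[str, List[Dict]]:
--     """Group words by their assigned level."""
--     words_by_level = {
--         'level1': [],
--         'level2': [],
--         'level3': [],
--         'level4': []
--     }
--
--     for word_data in words:
--         level = word_data['level']
--         if level in words_by_level:
--             words_by_level[level].append(word_data)
--
--     return words_by_level
-- ===== SOURCE B (Python) =====
-- from typing import Dict, List
--
-- LEVELS = ('level1', 'level2', 'level3', 'level4')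
--
-- def group_words_by_level(words: List[Dict]) -> Dict[str, List[Dict]]:
--     """Group words by their assigned level: one filtering scan per fixed level."""
--     return {lvl: [w for w in words if w['level'] == lvl] for lvl in LEVELS}
-- ===== Notes on version B (the rewrite author's own statement) =====
-- stated objective: idiomatic
-- what changed: Replaced the single-pass mutate-buckets loop over all words with a dict comprehension over the four fixed level keys, each value a filtering scan of the word list.
import Mathlib
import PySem

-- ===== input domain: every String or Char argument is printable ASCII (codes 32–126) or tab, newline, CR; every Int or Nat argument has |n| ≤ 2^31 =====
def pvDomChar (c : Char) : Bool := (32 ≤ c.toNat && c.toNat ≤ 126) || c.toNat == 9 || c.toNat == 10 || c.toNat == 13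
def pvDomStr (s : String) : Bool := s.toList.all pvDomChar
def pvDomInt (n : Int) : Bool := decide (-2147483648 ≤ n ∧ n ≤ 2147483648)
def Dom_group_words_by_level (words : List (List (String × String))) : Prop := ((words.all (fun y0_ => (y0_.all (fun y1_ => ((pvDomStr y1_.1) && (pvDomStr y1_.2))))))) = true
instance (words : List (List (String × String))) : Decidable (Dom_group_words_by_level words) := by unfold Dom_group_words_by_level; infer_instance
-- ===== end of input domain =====

-- ===== PORT A =====
-- B groups by a dict comprehension over the four fixed keys (one filter per level)
-- instead of A's single mutate-buckets pass; return values proved equal on Pre_.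
-- word_data['level'] : first-match lookup in the word's association list
def group_words_by_level (words : List (List (String × String))) : List (String × List (List (String × String))) :=
  -- words_by_level = {'level1': [], 'level2': [], 'level3': [], 'level4': []}
  let init : PySem.Dict String (List (List (String × String))) :=
    PySem.Dict.ofList [("level1", []), ("level2", []), ("level3", []), ("level4", [])]
  -- for word_data in words: level = word_data['level']; if level in words_by_level: append
  let final := words.foldl (fun d word_data =>
    match List.lookup "level" word_data with
    | none => d          -- KeyError in Python: excluded by Pre_
    | some level => if d.contains level then d.modify level [] (· ++ [word_data]) else d) init
  final.items

-- ===== PORT B =====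
def group_words_by_level_alt (words : List (List (String × String))) : List (String × List (List (String × String))) :=
  ["level1", "level2", "level3", "level4"].map
    (fun lvl => (lvl, words.filter (fun w => List.lookup "level" w == some lvl)))

-- ===== PRECONDITION & SPEC =====
-- Pre_ excludes exactly the inputs where a word dict has no 'level' key: there
-- Python A raises KeyError (and B raises KeyError too).
def Pre_group_words_by_level (words : List (List (String × String))) : Prop :=
  (words.all (fun w => (List.lookup "level" w).isSome)) = true
instance (words : List (List (String × String))) : Decidable (Pre_group_words_by_level words) := by
  unfold Pre_group_words_by_level; infer_instance
def pvWitness_group_words_by_level : (List (List (String × String))) :=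
  [[("level", "level1"), ("word", "cat")], [("level", "level9")]]
def Spec_group_words_by_level (words : List (List (String × String))) (out : List (String × List (List (String × String)))) : Prop := out = group_words_by_level_alt words
instance (words : List (List (String × String))) (out : List (String × List (List (String × String)))) : Decidable (Spec_group_words_by_level words out) := by unfold Spec_group_words_by_level; infer_instance

-- ===== CLAIM (what is proved, stated in full; the proofs are below) =====
def Claim_equal_group_words_by_level : Prop := ∀ (words : List (List (String × String))), Dom_group_words_by_level words → Pre_group_words_by_level words → Spec_group_words_by_level words (group_words_by_level words)

-- ===== LEMMAS AND PROOFS =====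

-- the loop body of port A, named for the proofs
def gwStep (d : PySem.Dict String (List (List (String × String)))) (word_data : List (String × String)) : PySem.Dict String (List (List (String × String))) :=
  match List.lookup "level" word_data with
  | none => d
  | some level => if d.contains level then d.modify level [] (· ++ [word_data]) else d

theorem gwStep_keys (d : PySem.Dict String (List (List (String × String)))) (w : List (String × String)) :
    (gwStep d w).keys = d.keys := by
  unfold gwStep
  cases List.lookup "level" w with
  | none => rfl
  | some l =>
    simp only
    by_cases h : d.contains l = true
    · rw [if_pos h, PySem.Dict.keys_modify, PySem.Dict.keys_insert_of_contains _ _ h]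
    · rw [if_neg h]

theorem gwFold_keys (ws : List (List (String × String))) (d : PySem.Dict String (List (List (String × String)))) :
    (ws.foldl gwStep d).keys = d.keys := by
  induction ws generalizing d with
  | nil => rfl
  | cons w rest ih => rw [List.foldl_cons, ih, gwStep_keys]

theorem gwFold_getD (ws : List (List (String × String))) (d : PySem.Dict String (List (List (String × String)))) (k : String)
    (hpre : ∀ w ∈ ws, (List.lookup "level" w).isSome) :
    (ws.foldl gwStep d).getD k [] =
      d.getD k [] ++ (if d.contains k = true then ws.filter (fun w => List.lookup "level" w == some k) else []) := by
  induction ws generalizing d with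
  | nil => simp
  | cons w rest ih =>
    obtain ⟨l, hl⟩ := Option.isSome_iff_exists.mp (hpre w (List.mem_cons_self))
    have hrest : ∀ w' ∈ rest, (List.lookup "level" w').isSome := fun w' hw' => hpre w' (List.mem_cons_of_mem _ hw')
    rw [List.foldl_cons]
    have hstep : gwStep d w = if d.contains l then d.modify l [] (· ++ [w]) else d := by
      unfold gwStep; rw [hl]
    by_cases hc : d.contains l = true
    · rw [hstep, if_pos hc, ih _ hrest, PySem.Dict.getD_modify]
      have hck : ∀ k', (d.modify l [] (fun x => x ++ [w])).contains k' = d.contains k' := by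
        intro k'
        rw [PySem.Dict.contains_modify]
        by_cases hkl : k' = l
        · simp [hkl, hc]
        · simp [hkl]
      rw [hck]
      by_cases hkl : k = l
      · subst hkl
        rw [if_pos rfl, if_pos hc, if_pos hc, List.filter_cons]
        simp [hl]
      · rw [if_neg hkl, List.filter_cons]
        have : (List.lookup "level" w == some k) = false := by
          rw [hl]; simp [Ne.symm hkl]
        rw [this]
        simp
    · rw [hstep, if_neg hc, ih _ hrest]
      by_cases hck : d.contains k = true
      · have hkl : k ≠ l := fun h => hc (h ▸ hck)
        rw [if_pos hck, if_pos hck, List.filter_cons]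
        have : (List.lookup "level" w == some k) = false := by
          rw [hl]; simp [Ne.symm hkl]
        rw [this]; simp
      · rw [if_neg hck, if_neg hck]

-- ===== VERDICT (by name: the statement is the Claim_ definition above) =====
theorem group_words_by_level_spec : Claim_equal_group_words_by_level := by
  intro words _hdom hpre
  unfold Spec_group_words_by_level group_words_by_level group_words_by_level_alt
  simp only
  have hpre' : ∀ w ∈ words, (List.lookup "level" w).isSome := by
    intro w hw
    have := List.all_eq_true.mp hpre w hw
    simpa using this
  set init : PySem.Dict String (List (List (String × String))) :=
    PySem.Dict.ofList [("level1", []), ("level2", []), ("level3", []), ("level4", [])] with hinit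
  have hfold : words.foldl (fun d word_data =>
      match List.lookup "level" word_data with
      | none => d
      | some level => if d.contains level then d.modify level [] (· ++ [word_data]) else d) init
      = words.foldl gwStep init := rfl
  rw [hfold]
  have hnd : (words.foldl gwStep init).keys.Nodup := by
    rw [gwFold_keys]; exact PySem.Dict.nodup_keys_ofList _
  rw [PySem.Dict.items_eq_map_keys _ hnd []]
  rw [gwFold_keys]
  have hkeys : init.keys = ["level1", "level2", "level3", "level4"] := by decide
  rw [hkeys]
  apply List.map_congr_left
  intro k hk
  have hck : init.contains k = true := by
    fin_cases hk <;> decide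
  have hgd : init.getD k [] = [] := by
    fin_cases hk <;> decide
  rw [gwFold_getD _ _ _ hpre', if_pos hck, hgd, List.nil_append]
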